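-- pv_equiv track=rewrite | github.com/Sanlador/School | CS531/sudoku.py | alldiff
-- ===== SOURCE A (Python) =====
-- def alldiff(board, row, col):
-- 	if board[row][col] != 0:
-- 		return [board[row][col]]
--
-- 	if row < 3:
-- 		squareRow = 0
-- 	elif row < 6:
-- 		squareRow = 3
-- 	else:
-- 		squareRow = 6
-- 	if col < 3:
-- 		squareCol = 0
-- 	elif col < 6:
-- 		squareCol = 3
-- 	else:
-- 		squareCol = 6
--
-- 	domain = [1,2,3,4,5,6,7,8,9]
-- 	for i in range(9):
-- 		if board[row][i] in domain and board[row][i] != 0 and i != col: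
-- 			domain.remove(board[row][i])
-- 		if board[i][col] in domain and board[i][col] != 0 and i != row:
-- 			domain.remove(board[i][col])
-- 	for i in range(3):
-- 		for j in range(3):
-- 			if board[squareRow + i][squareCol + j] in domain and board[squareRow + i][squareCol + j] != 0:
-- 				domain.remove(board[squareRow + i][squareCol + j])
-- 	return domain
-- ===== SOURCE B (Python) =====
-- def alldiff(board, row, col):
--     if board[row][col] != 0:
--         return [board[row][col]]
--
--     squareRow = 0 if row < 3 else (3 if row < 6 else 6)
--     squareCol = 0 if col < 3 else (3 if col < 6 else 6)
--
--     used = ([board[row][i] for i in range(9)]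
--             + [board[i][col] for i in range(9)]
--             + [board[squareRow + i][squareCol + j]
--                for i in range(3) for j in range(3)])
--     return [d for d in range(1, 10) if d not in used]
-- ===== Notes on version B (the rewrite author's own statement) =====
-- stated objective: simpler
-- what changed: Instead of mutating a shrinking candidate list with list.remove while scanning (with i!=col / i!=row guards), B collects all scanned row/column/box cell values into one list and returns a single filter of range(1,10) over non-membership.
import Mathlib
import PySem

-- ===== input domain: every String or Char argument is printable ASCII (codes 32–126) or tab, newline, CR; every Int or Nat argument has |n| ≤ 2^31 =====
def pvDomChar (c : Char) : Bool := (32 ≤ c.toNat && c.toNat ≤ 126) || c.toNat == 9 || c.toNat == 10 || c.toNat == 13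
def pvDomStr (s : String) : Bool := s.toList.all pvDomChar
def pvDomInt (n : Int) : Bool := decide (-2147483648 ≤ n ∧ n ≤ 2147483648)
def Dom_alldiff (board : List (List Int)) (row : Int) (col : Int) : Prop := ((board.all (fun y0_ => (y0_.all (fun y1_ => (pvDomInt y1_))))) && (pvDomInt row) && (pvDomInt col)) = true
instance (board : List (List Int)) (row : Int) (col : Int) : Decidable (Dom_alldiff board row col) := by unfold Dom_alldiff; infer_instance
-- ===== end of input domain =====

-- B replaces A's in-place removal from a shrinking candidate list with one collection of the
-- seen cell values followed by a single filter of range(1,10); equal return value on Pre_.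

-- board[r][c] as both Pythons read it (negative indices from the end; default irrelevant under Pre_)
def pvCell (board : List (List Int)) (r c : Int) : Int :=
  (PySem.List.pyGet? ((PySem.List.pyGet? board r).getD []) c).getD 0

-- ===== PORT A =====
def alldiff (board : List (List Int)) (row : Int) (col : Int) : List Int :=
  if pvCell board row col ≠ 0 then [pvCell board row col]
  else
    let squareRow : Int := if row < 3 then 0 else if row < 6 then 3 else 6
    let squareCol : Int := if col < 3 then 0 else if col < 6 then 3 else 6
    let domain : List Int := [1,2,3,4,5,6,7,8,9]
    let domain := (PySem.List.pyRange 0 9 1).foldl (fun dom i =>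
        let dom := if pvCell board row i ∈ dom ∧ pvCell board row i ≠ 0 ∧ i ≠ col
          then (PySem.List.remove? dom (pvCell board row i)).getD dom else dom
        if pvCell board i col ∈ dom ∧ pvCell board i col ≠ 0 ∧ i ≠ row
          then (PySem.List.remove? dom (pvCell board i col)).getD dom else dom) domain
    (PySem.List.pyRange 0 3 1).foldl (fun dom i =>
      (PySem.List.pyRange 0 3 1).foldl (fun dom j =>
        if pvCell board (squareRow + i) (squareCol + j) ∈ dom ∧ pvCell board (squareRow + i) (squareCol + j) ≠ 0
          then (PySem.List.remove? dom (pvCell board (squareRow + i) (squareCol + j))).getD dom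
          else dom) dom) domain

-- ===== PORT B =====
def alldiff_alt (board : List (List Int)) (row : Int) (col : Int) : List Int :=
  if pvCell board row col ≠ 0 then [pvCell board row col]
  else
    let squareRow : Int := if row < 3 then 0 else if row < 6 then 3 else 6
    let squareCol : Int := if col < 3 then 0 else if col < 6 then 3 else 6
    let used : List Int :=
      (PySem.List.pyRange 0 9 1).map (fun i => pvCell board row i)
      ++ (PySem.List.pyRange 0 9 1).map (fun i => pvCell board i col)
      ++ (PySem.List.pyRange 0 3 1).flatMap (fun i =>
           (PySem.List.pyRange 0 3 1).map (fun j => pvCell board (squareRow + i) (squareCol + j)))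
    (PySem.List.pyRange 1 10 1).filter (fun d => decide (d ∉ used))

-- ===== PRECONDITION & SPEC =====
-- Pre_ excludes exactly the inputs on which Python A raises (IndexError on board[row],
-- board[row][col], or — when that cell is 0 — on one of the scanned row/column/box cells).
def Pre_alldiff (board : List (List Int)) (row : Int) (col : Int) : Prop :=
  (PySem.List.pyGet? board row).isSome = true ∧
  (PySem.List.pyGet? ((PySem.List.pyGet? board row).getD []) col).isSome = true ∧
  (pvCell board row col ≠ 0 ∨
        (9 ≤ board.length ∧ 9 ≤ ((PySem.List.pyGet? board row).getD []).length ∧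
         ∀ i ∈ List.range 9,
           (PySem.List.pyGet? (board.getD i []) col).isSome = true ∧
           ((if row < 3 then (0:Int) else if row < 6 then 3 else 6) ≤ (i:Int) ∧
             (i:Int) < (if row < 3 then (0:Int) else if row < 6 then 3 else 6) + 3 →
             (if col < 3 then (0:Int) else if col < 6 then 3 else 6) + 3 ≤ ((board.getD i []).length : Int))))
instance (board : List (List Int)) (row : Int) (col : Int) : Decidable (Pre_alldiff board row col) := by
  unfold Pre_alldiff; infer_instance

def pvWitness_alldiff : List (List Int) × Int × Int :=
  ([[0,0,0,0,0,0,0,0,0],[0,0,0,0,0,0,0,0,0],[0,0,0,0,0,0,0,0,0],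
    [0,0,0,0,0,0,0,0,0],[0,0,0,0,0,0,0,0,0],[0,0,0,0,0,0,0,0,0],
    [0,0,0,0,0,0,0,0,0],[0,0,0,0,0,0,0,0,0],[0,0,0,0,0,0,0,0,0]], 0, 0)

def Spec_alldiff (board : List (List Int)) (row : Int) (col : Int) (out : List Int) : Prop := out = alldiff_alt board row col
instance (board : List (List Int)) (row : Int) (col : Int) (out : List Int) : Decidable (Spec_alldiff board row col out) := by unfold Spec_alldiff; infer_instance

-- ===== CLAIM (what is proved, stated in full; the proofs are below) =====
def Claim_equal_alldiff : Prop := ∀ (board : List (List Int)) (row : Int) (col : Int), Dom_alldiff board row col → Pre_alldiff board row col → Spec_alldiff board row col (alldiff board row col)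

-- ===== LEMMAS AND PROOFS =====

-- one removal step of A, with the value and the (decided) extra guard made explicit
def pvStep (dom : List Int) (vg : Int × Bool) : List Int :=
  if vg.1 ∈ dom ∧ vg.1 ≠ 0 ∧ vg.2 = true then (PySem.List.remove? dom vg.1).getD dom else dom

lemma pvStep_eq (dom : List Int) (v : Int) (g : Bool) (h : dom.Nodup) :
    pvStep dom (v, g) = dom.filter (fun d => decide ¬(g = true ∧ v ≠ 0 ∧ d = v)) := by
  unfold pvStep
  dsimp only
  by_cases hv : v ∈ dom ∧ v ≠ 0 ∧ g = true
  · rw [if_pos hv, PySem.List.remove?_eq_some_erase dom v hv.1, Option.getD_some,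
      List.Nodup.erase_eq_filter h v]
    apply List.filter_congr
    intro d _
    simp [hv.2.1, hv.2.2, bne]
    rw [Bool.eq_iff_iff]; simp
  · rw [if_neg hv]
    symm
    apply List.filter_eq_self.mpr
    intro d hd
    simp only [decide_eq_true_eq]
    rintro ⟨hg, hv0, rfl⟩
    exact hv ⟨hd, hv0, hg⟩

lemma pvFold_eq (vs : List (Int × Bool)) (dom : List Int) (h : dom.Nodup) :
    vs.foldl pvStep dom =
      dom.filter (fun d => decide (∀ vg ∈ vs, ¬(vg.2 = true ∧ vg.1 ≠ 0 ∧ d = vg.1))) := by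
  induction vs generalizing dom with
  | nil => simp
  | cons vg vs ih =>
    obtain ⟨v, g⟩ := vg
    rw [List.foldl_cons, pvStep_eq dom v g h, ih _ (h.filter _), List.filter_filter]
    apply List.filter_congr
    intro d _
    simp only [List.forall_mem_cons]
    rw [Bool.and_comm]
    simp

-- A's first loop as a fold of pvStep over an explicit (value, guard) list
lemma pvLoop1_eq (board : List (List Int)) (row col : Int) (l : List Int) (dom : List Int) :
    l.foldl (fun dom i =>
        let dom := if pvCell board row i ∈ dom ∧ pvCell board row i ≠ 0 ∧ i ≠ col
          then (PySem.List.remove? dom (pvCell board row i)).getD dom else dom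
        if pvCell board i col ∈ dom ∧ pvCell board i col ≠ 0 ∧ i ≠ row
          then (PySem.List.remove? dom (pvCell board i col)).getD dom else dom) dom
    = (l.flatMap (fun i =>
        [(pvCell board row i, decide (i ≠ col)), (pvCell board i col, decide (i ≠ row))])).foldl
        pvStep dom := by
  induction l generalizing dom with
  | nil => rfl
  | cons i l ih =>
    rw [List.foldl_cons, List.flatMap_cons, List.foldl_append, List.foldl_cons, List.foldl_cons, ih]
    congr 1
    simp [pvStep]

-- A's box loop likewise (all guards true)
lemma pvLoop2_eq (board : List (List Int)) (sr sc : Int) (l1 l2 : List Int) (dom : List Int) :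
    l1.foldl (fun dom i =>
      l2.foldl (fun dom j =>
        if pvCell board (sr + i) (sc + j) ∈ dom ∧ pvCell board (sr + i) (sc + j) ≠ 0
          then (PySem.List.remove? dom (pvCell board (sr + i) (sc + j))).getD dom
          else dom) dom) dom
    = (l1.flatMap (fun i => l2.map (fun j => (pvCell board (sr + i) (sc + j), true)))).foldl
        pvStep dom := by
  induction l1 generalizing dom with
  | nil => rfl
  | cons i l1 ih =>
    rw [List.foldl_cons, List.flatMap_cons, List.foldl_append, ih]
    congr 1
    clear ih
    induction l2 generalizing dom with
    | nil => rfl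
    | cons j l2 ih2 =>
      rw [List.foldl_cons, List.map_cons, List.foldl_cons, ih2]
      congr 1
      simp [pvStep]

lemma pvMain (board : List (List Int)) (row col : Int) (h0 : pvCell board row col = 0) :
    alldiff board row col = alldiff_alt board row col := by
  unfold alldiff alldiff_alt
  have hne : ¬(pvCell board row col ≠ 0) := fun hc => hc h0
  rw [if_neg hne, if_neg hne]
  dsimp only
  rw [pvLoop1_eq, pvLoop2_eq, ← List.foldl_append,
    pvFold_eq _ _ (by decide), show PySem.List.pyRange 1 10 1 = [1,2,3,4,5,6,7,8,9] by decide]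
  apply List.filter_congr
  intro d hd
  have hdne : d ≠ 0 := by simp at hd; omega
  rw [decide_eq_decide]
  constructor
  · intro hall hmem
    simp only [List.mem_append, List.mem_map, List.mem_flatMap] at hmem
    rcases hmem with (⟨i, hi, hc⟩ | ⟨i, hi, hc⟩) | ⟨i, hi, j, hj, hc⟩
    · by_cases hic : i = col
      · subst hic; rw [h0] at hc; exact hdne hc.symm
      · exact hall (pvCell board row i, decide (i ≠ col))
          (List.mem_append_left _ (List.mem_flatMap.mpr ⟨i, hi, by simp⟩))
          ⟨by simp [hic], by rw [hc]; exact hdne, hc.symm⟩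
    · by_cases hir : i = row
      · subst hir; rw [h0] at hc; exact hdne hc.symm
      · exact hall (pvCell board i col, decide (i ≠ row))
          (List.mem_append_left _ (List.mem_flatMap.mpr ⟨i, hi, by simp⟩))
          ⟨by simp [hir], by rw [hc]; exact hdne, hc.symm⟩
    · exact hall _
        (List.mem_append_right _ (List.mem_flatMap.mpr ⟨i, hi, List.mem_map.mpr ⟨j, hj, rfl⟩⟩))
        ⟨rfl, by rw [hc]; exact hdne, hc.symm⟩
  · intro hnot vg hvg hbad
    obtain ⟨hg, hv0, hdv⟩ := hbad
    apply hnot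
    simp only [List.mem_append, List.mem_map, List.mem_flatMap] at hvg ⊢
    rcases hvg with ⟨i, hi, hin⟩ | ⟨i, hi, hin⟩
    · simp only [List.mem_cons, List.not_mem_nil, or_false] at hin
      rcases hin with rfl | rfl
      · exact Or.inl (Or.inl ⟨i, hi, hdv.symm⟩)
      · exact Or.inl (Or.inr ⟨i, hi, hdv.symm⟩)
    · obtain ⟨j, hj, rfl⟩ := hin
      exact Or.inr ⟨i, hi, j, hj, hdv.symm⟩

theorem alldiff_spec : Claim_equal_alldiff := by
  intro board row col _ _
  unfold Spec_alldiff
  by_cases h0 : pvCell board row col = 0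
  · exact pvMain board row col h0
  · unfold alldiff alldiff_alt
    rw [if_pos h0, if_pos h0]
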